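-- pv_equiv track=rewrite | github.com/pypi-data/pypi-mirror-14 | packages/aioesl/aioesl-0.1.3.3.tar.gz/aioesl-0.1.3.3/aioesl/protocol.py | parse_raw_split
-- ===== SOURCE A (Python) =====
-- def parse_raw_split(split="|", raw="", need_fields=[], kill_fl=False):
--
--     data = []
--     raw = raw.get("DataResponse")
--     if raw is None:
--         return data
--
--     lines = raw.splitlines()
--     if kill_fl and len(lines) > 1:
--         lines = lines[1:]
--
--     if len(lines) > 1:
--         keys = lines[0].strip().split(split)
--         for line in lines[1:]:
--             fields = line.split(split)
--             if len(fields) != len(keys):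
--                 continue
--             r = {keys[i]: fields[i] for i in range(0, len(keys)) if keys[i] in need_fields or len(need_fields) == 0}
--             data.append(r)
--
--     return data
-- ===== SOURCE B (Python) =====
-- def parse_raw_split(split="|", raw="", need_fields=[], kill_fl=False):
--     text = raw.get("DataResponse")
--     if text is None:
--         return []
--     lines = text.splitlines()
--     if kill_fl and len(lines) > 1:
--         lines = lines[1:]
--     if len(lines) <= 1:
--         return []
--     keys = lines[0].strip().split(split)
--     # keep only the well-formed rows, then assemble the dicts COLUMN BY COLUMN
--     rows = [f for f in (line.split(split) for line in lines[1:]) if len(f) == len(keys)]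
--     dicts = [{} for _ in rows]
--     for j, k in enumerate(keys):
--         if len(need_fields) == 0 or k in need_fields:
--             for d, f in zip(dicts, rows):
--                 d[k] = f[j]
--     return dicts
-- ===== Notes on version B (the rewrite author's own statement) =====
-- stated objective: alternative
-- what changed: B builds the result column-major: it first filters the well-formed rows, then walks the header once and, for each kept column, fills that key into every row dict via a zip sweep, instead of A's row-major loop that rebuilds a filtered dict per line by scanning all key indices.
import Mathlib
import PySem

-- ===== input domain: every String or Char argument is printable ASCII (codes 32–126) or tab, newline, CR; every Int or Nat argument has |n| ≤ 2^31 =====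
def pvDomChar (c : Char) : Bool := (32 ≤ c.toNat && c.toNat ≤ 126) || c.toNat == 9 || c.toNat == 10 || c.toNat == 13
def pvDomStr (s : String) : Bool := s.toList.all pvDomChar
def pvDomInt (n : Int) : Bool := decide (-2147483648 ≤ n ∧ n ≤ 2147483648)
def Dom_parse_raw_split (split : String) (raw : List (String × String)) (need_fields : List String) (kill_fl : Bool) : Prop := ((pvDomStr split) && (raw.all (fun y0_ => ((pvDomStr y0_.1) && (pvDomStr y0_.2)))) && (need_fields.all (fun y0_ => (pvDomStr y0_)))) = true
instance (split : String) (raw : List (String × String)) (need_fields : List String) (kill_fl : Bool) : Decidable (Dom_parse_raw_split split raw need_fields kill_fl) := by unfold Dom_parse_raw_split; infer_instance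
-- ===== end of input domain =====

-- B assembles the result column-major: it filters the well-formed rows first, then fills each
-- kept header key into every row dict in one zip sweep per column; same results as A's row loop.


-- ===== PORT A =====
def parse_raw_split (split : String) (raw : List (String × String)) (need_fields : List String) (kill_fl : Bool) : List (List (String × String)) :=
  match (PySem.Dict.mk raw).get? "DataResponse" with
  | none => []
  | some rawS =>
    let lines0 := PySem.Str.splitlines rawS
    let lines := if kill_fl ∧ lines0.length > 1 then PySem.List.slice lines0 (some 1) none else lines0
    if lines.length > 1 then
      let keys := (PySem.Str.split? (PySem.Str.strip (PySem.List.pyGetD lines 0 "")) split).getD []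
      (PySem.List.slice lines (some 1) none).foldl (fun data line =>
        let fields := (PySem.Str.split? line split).getD []
        if fields.length ≠ keys.length then data
        else data ++ [((PySem.List.pyRange 0 (PySem.List.len keys) 1).foldl
            (fun (d : PySem.Dict String String) i =>
              if need_fields.contains (PySem.List.pyGetD keys i "") || need_fields.length == 0
              then d.insert (PySem.List.pyGetD keys i "") (PySem.List.pyGetD fields i "")
              else d) PySem.Dict.empty).items]) []
    else []

-- ===== PORT B =====
def parse_raw_split_alt (split : String) (raw : List (String × String)) (need_fields : List String) (kill_fl : Bool) : List (List (String × String)) :=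
  match (PySem.Dict.mk raw).get? "DataResponse" with
  | none => []
  | some text =>
    let lines0 := PySem.Str.splitlines text
    let lines := if kill_fl ∧ lines0.length > 1 then lines0.drop 1 else lines0
    if lines.length ≤ 1 then []
    else
      let keys := (PySem.Str.split? (PySem.Str.strip (lines.headD "")) split).getD []
      let rows := ((lines.drop 1).map (fun l => (PySem.Str.split? l split).getD [])).filter
        (fun f => decide (f.length = keys.length))
      let dicts := (PySem.List.enumerate keys).foldl
        (fun (ds : List (PySem.Dict String String)) p =>
          if need_fields.length == 0 || need_fields.contains p.2 then
            List.zipWith (fun d f => d.insert p.2 (PySem.List.pyGetD f p.1 "")) ds rows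
          else ds)
        (rows.map (fun _ => PySem.Dict.empty))
      dicts.map (fun d => d.items)

-- ===== PRECONDITION & SPEC =====
-- Pre_ excludes exactly the inputs where Python raises ValueError: split = "" while the
-- "DataResponse" text has enough lines for the data branch to call str.split("").
def Pre_parse_raw_split (split : String) (raw : List (String × String)) (need_fields : List String) (kill_fl : Bool) : Prop :=
  split ≠ "" ∨ (((PySem.Dict.mk raw).get? "DataResponse").all
    (fun s => decide ((PySem.Str.splitlines s).length ≤ if kill_fl then 2 else 1)) = true)
instance (split : String) (raw : List (String × String)) (need_fields : List String) (kill_fl : Bool) : Decidable (Pre_parse_raw_split split raw need_fields kill_fl) := by unfold Pre_parse_raw_split; infer_instance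
def pvWitness_parse_raw_split : String × (List (String × String)) × List String × Bool :=
  ("|", [("DataResponse", "a|b\nx|y\nu|v")], ["b"], false)
def Spec_parse_raw_split (split : String) (raw : List (String × String)) (need_fields : List String) (kill_fl : Bool) (out : List (List (String × String))) : Prop := out = parse_raw_split_alt split raw need_fields kill_fl
instance (split : String) (raw : List (String × String)) (need_fields : List String) (kill_fl : Bool) (out : List (List (String × String))) : Decidable (Spec_parse_raw_split split raw need_fields kill_fl out) := by unfold Spec_parse_raw_split; infer_instance

-- ===== CLAIM (what is proved, stated in full; the proofs are below) =====
def Claim_equal_parse_raw_split : Prop := ∀ (split : String) (raw : List (String × String)) (need_fields : List String) (kill_fl : Bool), Dom_parse_raw_split split raw need_fields kill_fl → Pre_parse_raw_split split raw need_fields kill_fl → Spec_parse_raw_split split raw need_fields kill_fl (parse_raw_split split raw need_fields kill_fl)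

-- ===== LEMMAS AND PROOFS =====

-- zipWith over a mapped copy of the same list acts pointwise
theorem zipWith_map_self {α β : Type} (h : β → α → β) (g : α → β) (l : List α) :
    List.zipWith h (l.map g) l = l.map (fun x => h (g x) x) := by
  induction l with
  | nil => rfl
  | cons x t ih => simp [ih]

-- the column-major fold over a list of per-row states equals the per-row fold, mapped
theorem foldl_zipWith_eq_map_foldl {α β γ : Type} (cols : List γ) (ok : γ → Bool)
    (step : γ → β → α → β) (rows : List α) (g : α → β) :
    cols.foldl (fun (ds : List β) c =>
        if ok c then List.zipWith (fun d f => step c d f) ds rows else ds) (rows.map g)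
      = rows.map (fun f => cols.foldl (fun d c => if ok c then step c d f else d) (g f)) := by
  induction cols generalizing g with
  | nil => rfl
  | cons c t ih =>
    by_cases h : ok c = true
    · simp only [List.foldl_cons, h, if_true, zipWith_map_self]
      exact ih (fun f => step c (g f) f)
    · simp only [List.foldl_cons, h, if_false, Bool.false_eq_true]
      exact ih g

-- the per-row dict built by A's index loop equals the per-row fold over enumerated columns
theorem inner_dict_eq (keys fields need_fields : List String) :
    (PySem.List.pyRange 0 (PySem.List.len keys) 1).foldl
        (fun (d : PySem.Dict String String) i =>
          if need_fields.contains (PySem.List.pyGetD keys i "") || need_fields.length == 0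
          then d.insert (PySem.List.pyGetD keys i "") (PySem.List.pyGetD fields i "")
          else d) PySem.Dict.empty
      = (PySem.List.enumerate keys).foldl
          (fun (d : PySem.Dict String String) p =>
            if need_fields.length == 0 || need_fields.contains p.2
            then d.insert p.2 (PySem.List.pyGetD fields p.1 "") else d) PySem.Dict.empty := by
  rw [PySem.List.enumerate_eq_map_pyRange (d := "")]
  rw [List.foldl_map]
  simp only [PySem.List.len_eq]
  congr 1
  funext d i
  rw [Bool.or_comm]

theorem headD_eq_pyGetD (lines : List String) :
    PySem.List.pyGetD lines 0 "" = lines.headD "" := by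
  cases lines <;> simp [PySem.List.pyGetD_zero, List.getD]

theorem parse_raw_split_spec : Claim_equal_parse_raw_split := by
  intro split raw need_fields kill_fl _ _
  unfold Spec_parse_raw_split parse_raw_split parse_raw_split_alt
  cases (PySem.Dict.mk raw).get? "DataResponse" with
  | none => rfl
  | some text =>
    simp only [PySem.List.slice_from_one, ← List.drop_one, headD_eq_pyGetD]
    set lines := if kill_fl ∧ (PySem.Str.splitlines text).length > 1
        then (PySem.Str.splitlines text).drop 1 else PySem.Str.splitlines text with hl
    by_cases h : lines.length > 1
    · rw [if_pos h, if_neg (by omega)]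
      set keys := (PySem.Str.split? (PySem.Str.strip (lines.headD "")) split).getD [] with hk
      simp only [ne_eq, ite_not]
      rw [PySem.List.foldl_append_ite
        (p := fun line => ((PySem.Str.split? line split).getD []).length = keys.length)]
      rw [foldl_zipWith_eq_map_foldl, List.filter_map, List.map_map, List.map_map]
      simp only [List.nil_append, Function.comp_def, inner_dict_eq]
    · rw [if_neg h, if_pos (by omega)]

-- ===== VERDICT (by name: the statement is the Claim_ definition above) =====
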